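-- pv_equiv track=rewrite | github.com/hminle/intro-neural-nets | two_moons/two_moons.py | count_mismatches
-- ===== SOURCE A (Python) =====
-- def count_mismatches(predicted_labels, actual_labels):
--     diffs = { 'false_0': 0, 'false_1': 0 }
--     for i in range(0, len(predicted_labels)):
--         if predicted_labels[i] == actual_labels[i]:
--             pass
--         else:
--             if predicted_labels[i] == 0:
--                 diffs['false_0'] = diffs['false_0'] + 1
--             else:
--                 diffs['false_1'] = diffs['false_1'] + 1
--     return diffs
-- ===== SOURCE B (Python) =====
-- def count_mismatches(predicted_labels, actual_labels):
--     pairs = list(zip(predicted_labels, actual_labels))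
--
--     def go(lo, hi):
--         if hi - lo == 0:
--             return (0, 0)
--         if hi - lo == 1:
--             p, a = pairs[lo]
--             if p == a:
--                 return (0, 0)
--             return (1, 0) if p == 0 else (0, 1)
--         mid = (lo + hi) // 2
--         l0, l1 = go(lo, mid)
--         r0, r1 = go(mid, hi)
--         return (l0 + r0, l1 + r1)
--
--     f0, f1 = go(0, len(pairs))
--     return {'false_0': f0, 'false_1': f1}
-- ===== Notes on version B (the rewrite author's own statement) =====
-- stated objective: alternative
-- what changed: Replaces A's single left-to-right index loop mutating a dict by a recursive divide-and-conquer over half-intervals of the zipped pairs that combines the two bucket counts of each half by addition.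
import Mathlib
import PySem

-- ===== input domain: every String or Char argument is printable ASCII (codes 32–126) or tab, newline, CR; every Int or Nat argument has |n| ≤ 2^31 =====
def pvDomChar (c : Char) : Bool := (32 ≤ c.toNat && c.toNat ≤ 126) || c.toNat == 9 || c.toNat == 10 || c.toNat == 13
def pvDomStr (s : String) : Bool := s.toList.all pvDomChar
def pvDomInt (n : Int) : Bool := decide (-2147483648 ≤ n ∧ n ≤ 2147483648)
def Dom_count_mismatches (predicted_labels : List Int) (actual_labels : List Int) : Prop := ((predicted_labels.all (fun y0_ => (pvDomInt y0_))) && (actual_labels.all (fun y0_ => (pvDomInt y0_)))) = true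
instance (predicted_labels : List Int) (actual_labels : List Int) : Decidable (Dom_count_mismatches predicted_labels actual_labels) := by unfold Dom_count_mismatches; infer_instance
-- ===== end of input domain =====

-- B replaces A's single left-to-right index loop mutating a dict by a recursive
-- divide-and-conquer over half-intervals of the zipped pairs (objective: alternative).

-- ===== PORT A =====
def count_mismatches (predicted_labels : List Int) (actual_labels : List Int) : List (String × Int) :=
  let diffs : PySem.Dict String Int := (PySem.Dict.empty.insert "false_0" 0).insert "false_1" 0
  let diffs :=
    (PySem.List.pyRange 0 (predicted_labels.length : Int) 1).foldl
      (fun d i =>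
        if PySem.List.pyGetD predicted_labels i 0 == PySem.List.pyGetD actual_labels i 0 then d
        else if PySem.List.pyGetD predicted_labels i 0 == 0 then
          d.insert "false_0" (d.getD "false_0" 0 + 1)
        else
          d.insert "false_1" (d.getD "false_1" 0 + 1)) diffs
  diffs.items

-- ===== PORT B =====
-- pairs[lo] is only read with lo < pairs.length (go is called with lo < hi ≤ len), so getD is exact there.
def goCM (pairs : List (Int × Int)) (lo hi : Nat) : Int × Int :=
  if hi - lo = 0 then (0, 0)
  else if hi - lo = 1 then
    let pa := pairs.getD lo ((0 : Int), (0 : Int))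
    if pa.1 = pa.2 then (0, 0)
    else if pa.1 = 0 then (1, 0) else (0, 1)
  else
    let mid := (lo + hi) / 2
    let l := goCM pairs lo mid
    let r := goCM pairs mid hi
    (l.1 + r.1, l.2 + r.2)
termination_by hi - lo
decreasing_by all_goals omega

def count_mismatches_alt (predicted_labels : List Int) (actual_labels : List Int) : List (String × Int) :=
  let pairs := predicted_labels.zip actual_labels
  let fs := goCM pairs 0 pairs.length
  [("false_0", fs.1), ("false_1", fs.2)]

-- ===== PRECONDITION & SPEC =====
-- Pre_ excludes inputs where actual_labels is shorter than predicted_labels: A raises IndexError there.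
def Pre_count_mismatches (predicted_labels : List Int) (actual_labels : List Int) : Prop :=
  predicted_labels.length ≤ actual_labels.length
instance (predicted_labels : List Int) (actual_labels : List Int) : Decidable (Pre_count_mismatches predicted_labels actual_labels) := by unfold Pre_count_mismatches; infer_instance
def pvWitness_count_mismatches : List Int × List Int := ([0, 1, 1], [1, 1, 0])

def Spec_count_mismatches (predicted_labels : List Int) (actual_labels : List Int) (out : List (String × Int)) : Prop := out = count_mismatches_alt predicted_labels actual_labels
instance (predicted_labels : List Int) (actual_labels : List Int) (out : List (String × Int)) : Decidable (Spec_count_mismatches predicted_labels actual_labels out) := by unfold Spec_count_mismatches; infer_instance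

-- ===== CLAIM (what is proved, stated in full; the proofs are below) =====
def Claim_equal_count_mismatches : Prop := ∀ (predicted_labels : List Int) (actual_labels : List Int), Dom_count_mismatches predicted_labels actual_labels → Pre_count_mismatches predicted_labels actual_labels → Spec_count_mismatches predicted_labels actual_labels (count_mismatches predicted_labels actual_labels)

-- ===== LEMMAS AND PROOFS =====

-- A's index loop over range(len(pred)) equals a fold over the zipped pairs when act is long enough.
theorem fold_range_eq_fold_zip {σ : Type} (step : σ → Int → Int → σ) :
    ∀ (pred act : List Int), pred.length ≤ act.length → ∀ (d : σ),
      (List.range pred.length).foldl (fun d k => step d (pred.getD k 0) (act.getD k 0)) d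
      = (pred.zip act).foldl (fun d pa => step d pa.1 pa.2) d := by
  intro pred
  induction pred with
  | nil => intro act _ d; simp
  | cons a as ih =>
    intro act hlen d
    cases act with
    | nil => simp at hlen
    | cons b bs =>
      simp only [List.length_cons, List.range_succ_eq_map, List.foldl_cons, List.foldl_map,
        List.getD_cons_zero, List.getD_cons_succ, List.zip_cons_cons]
      exact ih bs (by simpa using hlen) (step d a b)

theorem fold_idx_eq_fold_zip {σ : Type} (step : σ → Int → Int → σ)
    (pred act : List Int) (hlen : pred.length ≤ act.length) (d : σ) :
    (PySem.List.pyRange 0 (pred.length : Int) 1).foldl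
        (fun d i => step d (PySem.List.pyGetD pred i 0) (PySem.List.pyGetD act i 0)) d
      = (pred.zip act).foldl (fun d pa => step d pa.1 pa.2) d := by
  have hget : ∀ (xs : List Int) (k : Nat), PySem.List.pyGetD xs ((0 : Int) + ↑k) 0 = xs.getD k 0 := by
    intro xs k; rw [zero_add, PySem.List.pyGetD_natCast]
  rw [PySem.List.pyRange_one]
  simp only [sub_zero, Int.toNat_natCast, List.foldl_map, hget]
  exact fold_range_eq_fold_zip step pred act hlen d

-- A's loop body, as a function of pairs, starting from a two-key dict literal, counts each bucket.
theorem fold_counts (l : List (Int × Int)) : ∀ (c0 c1 : Int),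
    l.foldl (fun d pa =>
        if pa.1 == pa.2 then d
        else if pa.1 == (0 : Int) then d.insert "false_0" (d.getD "false_0" 0 + 1)
        else d.insert "false_1" (d.getD "false_1" 0 + 1))
      (PySem.Dict.mk [("false_0", c0), ("false_1", c1)])
    = PySem.Dict.mk [("false_0", c0 + (l.countP (fun pa => pa.1 != pa.2 && pa.1 == 0) : Int)),
                     ("false_1", c1 + (l.countP (fun pa => pa.1 != pa.2 && pa.1 != 0) : Int))] := by
  induction l with
  | nil => intro c0 c1; simp
  | cons pa rest ih =>
    intro c0 c1
    rw [List.foldl_cons]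
    by_cases h : pa.1 = pa.2
    · rw [if_pos (show (pa.1 == pa.2) = true by simp [h]), ih c0 c1]
      simp [h]
    · by_cases h0 : pa.1 = 0
      · have hins : (PySem.Dict.mk [("false_0", c0), ("false_1", c1)]).insert "false_0"
            ((PySem.Dict.mk [("false_0", c0), ("false_1", c1)]).getD "false_0" 0 + 1)
            = PySem.Dict.mk [("false_0", c0 + 1), ("false_1", c1)] := rfl
        rw [if_neg (show ¬ (pa.1 == pa.2) = true by simp [h]),
            if_pos (show (pa.1 == 0) = true by simp [h0]), hins, ih (c0 + 1) c1]
        have hpa2 : ¬ ((0 : Int) = pa.2) := fun he => h (h0.trans he)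
        simp [h0, hpa2]
        omega
      · have hins : (PySem.Dict.mk [("false_0", c0), ("false_1", c1)]).insert "false_1"
            ((PySem.Dict.mk [("false_0", c0), ("false_1", c1)]).getD "false_1" 0 + 1)
            = PySem.Dict.mk [("false_0", c0), ("false_1", c1 + 1)] := rfl
        rw [if_neg (show ¬ (pa.1 == pa.2) = true by simp [h]),
            if_neg (show ¬ (pa.1 == 0) = true by simp [h0]), hins, ih c0 (c1 + 1)]
        simp [h, h0]
        omega

-- B's divide-and-conquer on [lo, hi) computes the two bucket counts of that segment.
theorem goCM_counts (pairs : List (Int × Int)) :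
    ∀ (n lo hi : Nat), hi - lo = n → hi ≤ pairs.length →
      goCM pairs lo hi =
        ((((pairs.drop lo).take (hi - lo)).countP (fun pa => pa.1 != pa.2 && pa.1 == 0) : Int),
         (((pairs.drop lo).take (hi - lo)).countP (fun pa => pa.1 != pa.2 && pa.1 != 0) : Int)) := by
  intro n
  induction n using Nat.strong_induction_on with
  | _ n ih =>
    intro lo hi hn hhi
    unfold goCM
    by_cases h0 : hi - lo = 0
    · simp [h0]
    · by_cases h1 : hi - lo = 1
      · have hlo : lo < pairs.length := by omega
        have hseg : (pairs.drop lo).take (hi - lo) = [pairs.getD lo ((0 : Int), (0 : Int))] := by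
          rw [h1, List.drop_eq_getElem_cons hlo, List.take_succ_cons, List.take_zero,
              List.getD_eq_getElem pairs _ hlo]
        rw [if_neg h0, if_pos h1, hseg]
        set pa := pairs.getD lo ((0 : Int), (0 : Int)) with hpa
        by_cases he : pa.1 = pa.2
        · simp [he]
        · by_cases hz : pa.1 = 0
          · have : ¬ ((0 : Int) = pa.2) := fun h => he (hz.trans h)
            simp [hz, this]
          · simp [he, hz]
      · rw [if_neg h0, if_neg h1]
        have hmid1 : lo < (lo + hi) / 2 := by omega
        have hmid2 : (lo + hi) / 2 < hi := by omega
        have hl := ih ((lo + hi) / 2 - lo) (by omega) lo ((lo + hi) / 2) rfl (by omega)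
        have hr := ih (hi - (lo + hi) / 2) (by omega) ((lo + hi) / 2) hi rfl (by omega)
        have hsplit : (pairs.drop lo).take (hi - lo)
            = (pairs.drop lo).take ((lo + hi) / 2 - lo)
              ++ (pairs.drop ((lo + hi) / 2)).take (hi - (lo + hi) / 2) := by
          have hd : (pairs.drop lo).drop ((lo + hi) / 2 - lo) = pairs.drop ((lo + hi) / 2) := by
            rw [List.drop_drop]; congr 1; omega
          rw [← hd, ← List.take_add]
          congr 1; omega
        simp only [hl, hr, hsplit, List.countP_append]
        push_cast
        rfl

-- ===== VERDICT (by name: the statement is the Claim_ definition above) =====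
theorem count_mismatches_spec : Claim_equal_count_mismatches := by
  intro pred act _ hpre
  unfold Spec_count_mismatches count_mismatches count_mismatches_alt
  have hd0 : (PySem.Dict.empty.insert "false_0" (0:Int)).insert "false_1" 0
      = PySem.Dict.mk [("false_0", 0), ("false_1", 0)] := rfl
  simp only [hd0]
  have hz := fold_idx_eq_fold_zip
      (fun (d : PySem.Dict String Int) p a =>
        if p == a then d
        else if p == (0 : Int) then d.insert "false_0" (d.getD "false_0" 0 + 1)
        else d.insert "false_1" (d.getD "false_1" 0 + 1)) pred act hpre
      (PySem.Dict.mk [("false_0", 0), ("false_1", 0)])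
  beta_reduce at hz
  rw [hz, fold_counts]
  have hb := goCM_counts (pred.zip act) (pred.zip act).length 0 (pred.zip act).length rfl le_rfl
  simp only [List.drop_zero, Nat.sub_zero, List.take_length] at hb
  rw [List.length_zip] at hb
  simp [hb]
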